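-- pv_equiv track=rewrite | github.com/TheOneCurly/StairLights | colors.py | get_alternating_colors
-- ===== SOURCE A (Python) =====
-- def get_alternating_colors(color_list, num_pixels):
--     pixels = []
--
--     colors = len(color_list)
--     current_color = 0
--
--     for i in range(num_pixels):
--         pixels.append(color_list[current_color % colors])
--         current_color += 1
--
--     return pixels
-- ===== SOURCE B (Python) =====
-- def get_alternating_colors(color_list, num_pixels):
--     if num_pixels <= 0:
--         return []
--     colors = len(color_list)
--     return color_list * (num_pixels // colors) + color_list[:num_pixels % colors]
-- ===== Notes on version B (the rewrite author's own statement) =====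
-- stated objective: idiomatic
-- what changed: Replaces the element-by-element append loop with a modulo counter by whole-list replication (list multiplication) plus one slice for the remainder.
import Mathlib
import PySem

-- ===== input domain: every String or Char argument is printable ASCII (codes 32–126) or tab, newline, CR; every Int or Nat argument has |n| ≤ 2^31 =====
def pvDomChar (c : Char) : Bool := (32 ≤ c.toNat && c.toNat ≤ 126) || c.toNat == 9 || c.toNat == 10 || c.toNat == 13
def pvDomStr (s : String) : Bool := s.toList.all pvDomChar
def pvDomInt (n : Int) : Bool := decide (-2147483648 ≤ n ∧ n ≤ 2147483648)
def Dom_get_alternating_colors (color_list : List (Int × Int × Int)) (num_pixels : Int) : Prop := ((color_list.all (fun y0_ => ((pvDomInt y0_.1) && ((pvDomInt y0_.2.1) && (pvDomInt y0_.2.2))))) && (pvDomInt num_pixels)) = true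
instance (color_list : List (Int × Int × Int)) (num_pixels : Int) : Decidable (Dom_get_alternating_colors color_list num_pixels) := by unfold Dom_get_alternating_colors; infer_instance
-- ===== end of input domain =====

-- B replaces A's per-element append loop (modulo counter) by whole-list replication plus one slice for the remainder.
-- Pre_ excludes the inputs where A raises ZeroDivisionError (empty color_list with positive num_pixels).


-- ===== PORT A =====
-- the loop body ignores i; state is (pixels, current_color); out-of-range index defaults (excluded by Pre_)
def get_alternating_colors (color_list : List (Int × Int × Int)) (num_pixels : Int) : List (Int × Int × Int) :=
  let colors : Int := color_list.length
  ((PySem.List.pyRange 0 num_pixels 1).foldl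
    (fun (st : List (Int × Int × Int) × Int) _i =>
      (st.1 ++ [PySem.List.pyGetD color_list (PySem.Int.mod st.2 colors) (0, 0, 0)], st.2 + 1))
    ([], 0)).1

-- ===== PORT B =====
def get_alternating_colors_alt (color_list : List (Int × Int × Int)) (num_pixels : Int) : List (Int × Int × Int) :=
  if num_pixels ≤ 0 then []
  else
    let colors : Int := color_list.length
    (List.replicate (PySem.Int.floordiv num_pixels colors).toNat color_list).flatten ++
      PySem.List.slice color_list none (some (PySem.Int.mod num_pixels colors))

-- ===== PRECONDITION & SPEC =====
-- Pre_ excludes exactly the inputs where A raises ZeroDivisionError: empty color_list with num_pixels > 0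
def Pre_get_alternating_colors (color_list : List (Int × Int × Int)) (num_pixels : Int) : Prop :=
  color_list = [] → num_pixels ≤ 0
instance (color_list : List (Int × Int × Int)) (num_pixels : Int) : Decidable (Pre_get_alternating_colors color_list num_pixels) := by unfold Pre_get_alternating_colors; infer_instance
def pvWitness_get_alternating_colors : (List (Int × Int × Int)) × Int := ([(1, 2, 3), (4, 5, 6)], 5)

def Spec_get_alternating_colors (color_list : List (Int × Int × Int)) (num_pixels : Int) (out : List (Int × Int × Int)) : Prop := out = get_alternating_colors_alt color_list num_pixels
instance (color_list : List (Int × Int × Int)) (num_pixels : Int) (out : List (Int × Int × Int)) : Decidable (Spec_get_alternating_colors color_list num_pixels out) := by unfold Spec_get_alternating_colors; infer_instance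

-- ===== CLAIM (what is proved, stated in full; the proofs are below) =====
def Claim_equal_get_alternating_colors : Prop := ∀ (color_list : List (Int × Int × Int)) (num_pixels : Int), Dom_get_alternating_colors color_list num_pixels → Pre_get_alternating_colors color_list num_pixels → Spec_get_alternating_colors color_list num_pixels (get_alternating_colors color_list num_pixels)

-- ===== LEMMAS AND PROOFS =====

-- A's fold, characterized: appending g(c), g(c+1), … for the length of the ignored-element list
theorem foldA_char (cl : List (Int × Int × Int)) (l : List Int) :
    ∀ (p : List (Int × Int × Int)) (c : Int),
    (l.foldl
      (fun (st : List (Int × Int × Int) × Int) _i =>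
        (st.1 ++ [PySem.List.pyGetD cl (PySem.Int.mod st.2 (cl.length : Int)) (0, 0, 0)], st.2 + 1))
      (p, c)) =
    (p ++ (List.range l.length).map
        (fun (k : Nat) => PySem.List.pyGetD cl (PySem.Int.mod (c + (k : Int)) (cl.length : Int)) (0, 0, 0)),
      c + l.length) := by
  induction l with
  | nil => intro p c; simp
  | cons x xs ih =>
    intro p c
    simp only [List.foldl_cons]
    rw [ih]
    simp only [Prod.mk.injEq]
    constructor
    · simp only [List.length_cons, List.range_succ_eq_map, List.map_cons, List.map_map,
        Nat.cast_zero, add_zero, List.append_assoc, List.singleton_append]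
      congr 2
      apply List.map_congr_left
      intro k _
      simp only [Function.comp_apply]
      congr 2
      push_cast
      ring
    · simp only [List.length_cons]; push_cast; ring

-- the cyclic Nat identity behind the equivalence
theorem cycle_eq (cl : List (Int × Int × Int)) (hcl : cl ≠ []) :
    ∀ m : Nat,
    (List.range m).map (fun k => cl.getD (k % cl.length) (0, 0, 0)) =
      (List.replicate (m / cl.length) cl).flatten ++ cl.take (m % cl.length) := by
  have hL : 0 < cl.length := List.length_pos_iff.mpr hcl
  intro m
  induction m using Nat.strong_induction_on with
  | _ m ih =>
    by_cases hm : m < cl.length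
    · rw [Nat.div_eq_of_lt hm, Nat.mod_eq_of_lt hm]
      simp only [List.replicate_zero, List.flatten_nil, List.nil_append]
      apply List.ext_getElem
      · simp [Nat.le_of_lt hm]
      · intro i h1 h2
        simp only [List.getElem_map, List.getElem_range, List.getElem_take]
        have : i < m := by simpa using h1
        rw [Nat.mod_eq_of_lt (lt_trans this hm), List.getD_eq_getElem]
    · rw [not_lt] at hm
      obtain ⟨m', rfl⟩ : ∃ m', m = cl.length + m' := ⟨m - cl.length, by omega⟩
      have hdiv : (cl.length + m') / cl.length = m' / cl.length + 1 := by
        rw [Nat.add_comm, Nat.add_div_right _ hL]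
      have hmod : (cl.length + m') % cl.length = m' % cl.length := by
        rw [Nat.add_comm, Nat.add_mod_right]
      rw [hdiv, hmod, List.range_add, List.map_append, List.map_map]
      have h1 : (List.range cl.length).map (fun k => cl.getD (k % cl.length) (0, 0, 0)) = cl := by
        apply List.ext_getElem
        · simp
        · intro i hi1 hi2
          simp only [List.getElem_map, List.getElem_range]
          rw [Nat.mod_eq_of_lt (by simpa using hi1), List.getD_eq_getElem]
      have h2 : (List.range m').map ((fun k => cl.getD (k % cl.length) (0, 0, 0)) ∘
            (fun j => cl.length + j)) =
          (List.range m').map (fun k => cl.getD (k % cl.length) (0, 0, 0)) := by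
        apply List.map_congr_left
        intro k _
        simp [Nat.add_mod_left]
      rw [h1, h2, ih m' (by omega)]
      simp [List.replicate_succ, List.append_assoc]

theorem get_alternating_colors_spec : Claim_equal_get_alternating_colors := by
  intro cl n _hdom hpre
  unfold Spec_get_alternating_colors get_alternating_colors get_alternating_colors_alt
  by_cases hn : n ≤ 0
  · simp [hn, PySem.List.pyRange_one_eq_nil (by omega : n ≤ 0)]
  · rw [not_le] at hn
    have hcl : cl ≠ [] := by
      intro h; exact absurd (hpre h) (by omega)
    have hL : 0 < cl.length := List.length_pos_iff.mpr hcl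
    simp only [if_neg (by omega : ¬ n ≤ 0)]
    -- rewrite n as a Nat cast
    obtain ⟨m, rfl⟩ : ∃ m : Nat, n = (m : Int) := ⟨n.toNat, by omega⟩
    rw [foldA_char]
    simp only [List.nil_append]
    have hlen : (PySem.List.pyRange 0 (m : Int) 1).length = m := by
      rw [PySem.List.length_pyRange_one]; omega
    rw [hlen]
    have hA : (List.range m).map
        (fun (k : Nat) => PySem.List.pyGetD cl (PySem.Int.mod ((0 : Int) + (k : Int)) (cl.length : Int)) (0, 0, 0)) =
        (List.range m).map (fun k => cl.getD (k % cl.length) (0, 0, 0)) := by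
      apply List.map_congr_left
      intro k _
      rw [zero_add, PySem.Int.mod_natCast, PySem.List.pyGetD_natCast]
    rw [hA, cycle_eq cl hcl m]
    rw [PySem.Int.floordiv_natCast, PySem.Int.mod_natCast, PySem.List.slice_to_natCast]
    simp only [Int.toNat_natCast]
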